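-- pv_equiv track=rewrite | github.com/nibzard/mailhook_oss | src/mailhookoss/domain/emails/service.py | extract_quoted_text
-- ===== SOURCE A (Python) =====
-- def extract_quoted_text(text_body: str) -> tuple[str, str]:
--     """Extract quoted text from email body.
--
--     Args:
--         text_body: Email text body
--
--     Returns:
--         Tuple of (new_text, quoted_text)
--     """
--     lines = text_body.split("\n")
--     new_lines = []
--     quoted_lines = []
--     in_quoted = False
--
--     for line in lines:
--         # Common quote markers
--         if (
--             line.startswith(">")
--             or line.startswith("On ")
--             and " wrote:" in line
--             or line.strip().startswith("-----Original Message-----")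
--         ):
--             in_quoted = True
--
--         if in_quoted:
--             quoted_lines.append(line)
--         else:
--             new_lines.append(line)
--
--     return "\n".join(new_lines).strip(), "\n".join(quoted_lines).strip()
-- ===== SOURCE B (Python) =====
-- def _is_quote_start(line):
--     return (
--         line.startswith(">")
--         or line.startswith("On ") and " wrote:" in line
--         or line.strip().startswith("-----Original Message-----")
--     )
--
--
-- def extract_quoted_text(text_body: str) -> tuple[str, str]:
--     """Extract quoted text from email body: since the quoted flag latches on
--     permanently, find the first quote-marker line and slice there."""
--     lines = text_body.split("\n")
--     idx = next((i for i, line in enumerate(lines) if _is_quote_start(line)), len(lines))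
--     return "\n".join(lines[:idx]).strip(), "\n".join(lines[idx:]).strip()
-- ===== Notes on version B (the rewrite author's own statement) =====
-- stated objective: simpler
-- what changed: Replaces the latching-flag loop with two accumulator lists by locating the first quote-marker line's index and slicing the line list there.
import Mathlib
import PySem

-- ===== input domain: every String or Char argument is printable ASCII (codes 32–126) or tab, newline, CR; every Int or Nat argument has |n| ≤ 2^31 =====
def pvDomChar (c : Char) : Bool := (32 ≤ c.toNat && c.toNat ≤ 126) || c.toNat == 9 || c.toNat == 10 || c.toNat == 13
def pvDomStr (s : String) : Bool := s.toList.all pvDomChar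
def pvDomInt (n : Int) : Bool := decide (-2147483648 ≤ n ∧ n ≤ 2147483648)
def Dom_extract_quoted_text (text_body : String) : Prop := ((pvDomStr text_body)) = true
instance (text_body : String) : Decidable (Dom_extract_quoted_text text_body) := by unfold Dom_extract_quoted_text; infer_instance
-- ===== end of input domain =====

-- B replaces A's latching-flag loop with two accumulators by finding the first
-- quote-marker line's index and slicing the line list there (objective: simpler).

-- ===== PORT A =====
-- the quote-marker condition, shared verbatim by both Pythons
def pvQuotePred (line : List Char) : Bool :=
  PySem.Chars.startswith line ">".toList
    || (PySem.Chars.startswith line "On ".toList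
          && PySem.Chars.isIn " wrote:".toList line)
    || PySem.Chars.startswith (PySem.Chars.strip line) "-----Original Message-----".toList

-- A's loop: state (new_lines, quoted_lines, in_quoted), flag latches on
def pvLoopA (st : List (List Char) × List (List Char) × Bool) (line : List Char) :
    List (List Char) × List (List Char) × Bool :=
  let inq := if pvQuotePred line then true else st.2.2
  if inq then (st.1, st.2.1 ++ [line], inq) else (st.1 ++ [line], st.2.1, inq)

def extract_quoted_text (text_body : String) : String × String :=
  let lines := PySem.Chars.splitOn text_body.toList ['\n']
  let res := lines.foldl pvLoopA ([], [], false)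
  (String.ofList (PySem.Chars.strip (PySem.Chars.join ['\n'] res.1)),
   String.ofList (PySem.Chars.strip (PySem.Chars.join ['\n'] res.2.1)))

-- ===== PORT B =====
-- index of the first quote-marker line, defaulting to the length (Source B's next(...))
def pvBoundary : List (List Char) → Nat
  | [] => 0
  | l :: ls => if pvQuotePred l then 0 else pvBoundary ls + 1

def extract_quoted_text_alt (text_body : String) : String × String :=
  let lines := PySem.Chars.splitOn text_body.toList ['\n']
  let idx := pvBoundary lines
  (String.ofList (PySem.Chars.strip (PySem.Chars.join ['\n'] (lines.take idx))),
   String.ofList (PySem.Chars.strip (PySem.Chars.join ['\n'] (lines.drop idx))))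

-- ===== PRECONDITION & SPEC =====
def Spec_extract_quoted_text (text_body : String) (out : String × String) : Prop := out = extract_quoted_text_alt text_body
instance (text_body : String) (out : String × String) : Decidable (Spec_extract_quoted_text text_body out) := by unfold Spec_extract_quoted_text; infer_instance

-- ===== CLAIM (what is proved, stated in full; the proofs are below) =====
def Claim_equal_extract_quoted_text : Prop := ∀ (text_body : String), Dom_extract_quoted_text text_body → Spec_extract_quoted_text text_body (extract_quoted_text text_body)

-- ===== LEMMAS AND PROOFS =====

-- once in_quoted is true, everything goes to quoted_lines
lemma pvLoopA_latched (lines : List (List Char)) (n q : List (List Char)) :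
    lines.foldl pvLoopA (n, q, true) = (n, q ++ lines, true) := by
  induction lines generalizing q with
  | nil => simp
  | cons l ls ih =>
      simp only [List.foldl_cons, pvLoopA]
      simp [ih]

-- the loop from a not-yet-latched state splits the lines at pvBoundary
lemma pvLoopA_spec (lines : List (List Char)) (n q : List (List Char)) :
    lines.foldl pvLoopA (n, q, false) =
      (n ++ lines.take (pvBoundary lines), q ++ lines.drop (pvBoundary lines),
       decide (pvBoundary lines < lines.length)) := by
  induction lines generalizing n with
  | nil => simp [pvBoundary]
  | cons l ls ih =>
      by_cases h : pvQuotePred l = true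
      · simp [pvBoundary, h, pvLoopA, pvLoopA_latched]
      · simp only [List.foldl_cons, pvLoopA, h, Bool.false_eq_true, if_false]
        rw [ih]
        simp [pvBoundary, h]

-- ===== VERDICT (by name: the statement is the Claim_ definition above) =====
theorem extract_quoted_text_spec : Claim_equal_extract_quoted_text := by
  intro text_body _
  unfold Spec_extract_quoted_text extract_quoted_text extract_quoted_text_alt
  simp [pvLoopA_spec]
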